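-- pv_equiv track=rewrite | github.com/LeResKP/xmltool | xmltool/render.py | attrs_to_str
-- ===== SOURCE A (Python) =====
-- def attrs_to_str(attrs):
--     """Create string from the given attrs
--
--     :param attrs: The attributes to put on HTML element.
--     :type attrs: List of tuple
--     :return: The givens attrs as string like: 'name="myname"'
--     :rtype: str
--     """
--     dic = {}
--     for k, v in attrs:
--         dic.setdefault(k, []).append(str(v))
--
--     lis = []
--     for k, v in attrs:
--         l = dic.pop(k, None)
--         if not l:
--             continue
--         lis += ['%s="%s"' % (k, ' '.join(l))]
--
--     if not lis:
--         return ''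
--
--     return ' ' + ' '.join(lis)
-- ===== SOURCE B (Python) =====
-- def attrs_to_str(attrs):
--     """Create string from the given attrs
--
--     :param attrs: The attributes to put on HTML element.
--     :type attrs: List of tuple
--     :return: The givens attrs as string like: 'name="myname"'
--     :rtype: str
--     """
--     dic = {}
--     for k, v in attrs:
--         dic.setdefault(k, []).append(str(v))
--     if not dic:
--         return ''
--     return ' ' + ' '.join('%s="%s"' % (k, ' '.join(vs)) for k, vs in dic.items())
-- ===== Notes on version B (the rewrite author's own statement) =====
-- stated objective: simpler
-- what changed: B keeps the one-pass grouping dict but drops A's second scan over attrs with its pop-and-sentinel logic, emitting the result directly from dict.items() (insertion order = first-occurrence key order).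
import Mathlib
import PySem

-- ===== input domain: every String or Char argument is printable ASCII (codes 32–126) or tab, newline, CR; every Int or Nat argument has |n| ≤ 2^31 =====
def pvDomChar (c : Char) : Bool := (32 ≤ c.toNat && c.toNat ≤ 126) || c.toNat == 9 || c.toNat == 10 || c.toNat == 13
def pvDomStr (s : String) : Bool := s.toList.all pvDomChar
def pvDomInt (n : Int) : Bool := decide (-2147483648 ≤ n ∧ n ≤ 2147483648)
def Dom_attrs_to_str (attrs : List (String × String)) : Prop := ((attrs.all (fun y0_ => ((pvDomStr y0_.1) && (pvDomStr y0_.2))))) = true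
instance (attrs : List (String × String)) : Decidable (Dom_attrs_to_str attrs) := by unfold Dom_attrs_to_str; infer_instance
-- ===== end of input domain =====

-- B drops A's second scan over attrs (pop-and-sentinel) and renders straight from the grouping
-- dict's items (insertion order = first-occurrence key order); objective: simpler.

-- ===== PORT A =====
-- '%s="%s"' % (k, ' '.join(l))
def pvFmtA (k : String) (l : List String) : String := k ++ "=\"" ++ PySem.Str.join " " l ++ "\""

-- body of A's second 'for k, v in attrs' loop: l = dic.pop(k, None); if not l: continue; lis += [...]
def pvStepA (st : PySem.Dict String (List String) × List String) (p : String × String) :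
    PySem.Dict String (List String) × List String :=
  match st.1.pop? p.1 with
  | none => st
  | some (l, d') => if l = [] then (d', st.2) else (d', st.2 ++ [pvFmtA p.1 l])

def attrs_to_str (attrs : List (String × String)) : String :=
  -- dic = {}; for k, v in attrs: dic.setdefault(k, []).append(str(v))   (str(v) = v on String)
  let dic := attrs.foldl (fun d p => d.modify p.1 [] (fun x => x ++ [p.2])) PySem.Dict.empty
  -- lis = []; for k, v in attrs: …
  let lis := (attrs.foldl pvStepA (dic, [])).2
  if lis = [] then "" else " " ++ PySem.Str.join " " lis

-- ===== PORT B =====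
def attrs_to_str_alt (attrs : List (String × String)) : String :=
  let dic := attrs.foldl (fun d p => d.modify p.1 [] (fun x => x ++ [p.2])) PySem.Dict.empty
  if dic.items = [] then ""
  else " " ++ PySem.Str.join " " (dic.items.map (fun p => p.1 ++ "=\"" ++ PySem.Str.join " " p.2 ++ "\""))

-- ===== PRECONDITION & SPEC =====
def Spec_attrs_to_str (attrs : List (String × String)) (out : String) : Prop := out = attrs_to_str_alt attrs
instance (attrs : List (String × String)) (out : String) : Decidable (Spec_attrs_to_str attrs out) := by unfold Spec_attrs_to_str; infer_instance

-- ===== CLAIM (what is proved, stated in full; the proofs are below) =====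
def Claim_equal_attrs_to_str : Prop := ∀ (attrs : List (String × String)), Dom_attrs_to_str attrs → Spec_attrs_to_str attrs (attrs_to_str attrs)

-- ===== LEMMAS AND PROOFS =====

-- keys emitted by A's second loop: first occurrences that are still in the (shrinking) dict
def pvKeysIn (l : List String) (d : PySem.Dict String (List String)) : List String :=
  match l with
  | [] => []
  | k :: ks => if d.contains k then k :: pvKeysIn ks (d.erase k) else pvKeysIn ks d

theorem pv_contains_erase (d : PySem.Dict String (List String)) (k x : String) :
    (d.erase k).contains x = (!(x == k) && d.contains x) := by
  simp only [PySem.Dict.contains, PySem.Dict.erase, List.any_filter]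
  by_cases hx : x = k
  · subst hx; simp
  · rw [show (fun (a : String × List String) => !a.1 == k && a.1 == x)
        = (fun a => a.1 == x) from funext fun a => by
          by_cases h2 : a.1 = x
          · simp [h2, hx]
          · simp [h2]]
    simp [hx]

theorem pv_get?_erase (d : PySem.Dict String (List String)) (k x : String) (h : x ≠ k) :
    (d.erase k).get? x = d.get? x := by
  simp only [PySem.Dict.get?, PySem.Dict.erase]
  congr 1
  induction d.items with
  | nil => rfl
  | cons p rest ih =>
      by_cases hk : p.1 = k
      · simp [hk, Ne.symm h, ih]
      · by_cases hx : p.1 = x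
        · simp [hx, h]
        · simp [hk, hx, ih]

theorem pv_nodup_keys_erase (d : PySem.Dict String (List String)) (k : String)
    (h : d.keys.Nodup) : (d.erase k).keys.Nodup := by
  simp only [PySem.Dict.keys, PySem.Dict.erase] at *
  exact (List.Sublist.map _ List.filter_sublist).nodup h

theorem pv_keysIn_eq_filter (l : List String) (d : PySem.Dict String (List String)) :
    pvKeysIn l d = (PySem.Set.ofList l).filter (fun x => d.contains x) := by
  induction l generalizing d with
  | nil => simp [pvKeysIn, PySem.Set.ofList_nil]
  | cons k ks ih =>
      rw [PySem.Set.ofList_cons]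
      by_cases hc : d.contains k = true
      · simp only [pvKeysIn, hc, if_true]
        rw [ih]
        simp only [List.filter_cons, hc, PySem.Set.discard, List.filter_filter]
        congr 1
        refine List.filter_congr ?_
        intro x _
        rw [pv_contains_erase, Bool.and_comm]
      · have hc' : d.contains k = false := by simpa using hc
        simp only [pvKeysIn, hc', Bool.false_eq_true, if_false]
        rw [ih]
        simp only [List.filter_cons, hc', PySem.Set.discard, List.filter_filter]
        refine List.filter_congr ?_
        intro x _
        by_cases hx : x = k
        · subst hx; simp [hc']
        · simp [hx]

-- A's second loop produces the formatted entries of the keys pvKeysIn picks, in order.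
theorem pv_loopA (l : List (String × String)) (d : PySem.Dict String (List String))
    (lis : List String)
    (hne : ∀ k, d.contains k = true → d.getD k [] ≠ []) (hnd : d.keys.Nodup) :
    (l.foldl pvStepA (d, lis)).2
      = lis ++ (pvKeysIn (l.map (·.1)) d).map (fun k => pvFmtA k (d.getD k [])) := by
  induction l generalizing d lis with
  | nil => simp [pvKeysIn]
  | cons p rest ih =>
      by_cases hc : d.contains p.1 = true
      · obtain ⟨g, hg⟩ : ∃ g, d.get? p.1 = some g := by
          cases h : d.get? p.1 with
          | none => rw [PySem.Dict.get?_eq_none_iff_contains] at h; simp [h] at hc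
          | some g => exact ⟨g, rfl⟩
        have hgD : d.getD p.1 [] = g := PySem.Dict.getD_of_get?_eq_some d [] hg
        have hgne : g ≠ [] := hgD ▸ hne p.1 hc
        have hstep : pvStepA (d, lis) p = (d.erase p.1, lis ++ [pvFmtA p.1 g]) := by
          simp [pvStepA, PySem.Dict.pop?, hg, hgne]
        rw [List.foldl_cons, hstep, ih (d.erase p.1) _
          (fun k hk => by
            rw [pv_contains_erase] at hk
            have hne' : k ≠ p.1 := by
              intro h; rw [h] at hk; simp at hk
            rw [PySem.Dict.getD, pv_get?_erase d p.1 k hne', ← PySem.Dict.getD]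
            exact hne k (by simpa [hne'] using hk))
          (pv_nodup_keys_erase d p.1 hnd)]
        simp only [List.map_cons, pvKeysIn, hc, if_true, List.map_cons, hgD,
          List.append_assoc, List.singleton_append]
        congr 2
        refine List.map_congr_left ?_
        intro k hk
        have hck : (d.erase p.1).contains k = true := by
          rw [pv_keysIn_eq_filter] at hk
          exact (List.mem_filter.mp hk).2
        have hkne : k ≠ p.1 := by
          intro h; rw [pv_contains_erase, h] at hck; simp at hck
        rw [PySem.Dict.getD, pv_get?_erase d p.1 k hkne, ← PySem.Dict.getD]
      · have hc' : d.contains p.1 = false := by simpa using hc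
        have hg : d.get? p.1 = none := (PySem.Dict.get?_eq_none_iff_contains d p.1).mpr hc'
        have hstep : pvStepA (d, lis) p = (d, lis) := by
          simp [pvStepA, PySem.Dict.pop?, hg]
        rw [List.foldl_cons, hstep, ih d lis hne hnd]
        simp [pvKeysIn, hc']

theorem attrs_to_str_eq (attrs : List (String × String)) :
    attrs_to_str attrs = attrs_to_str_alt attrs := by
  unfold attrs_to_str attrs_to_str_alt
  simp only []
  set dic := attrs.foldl (fun d p => d.modify p.1 [] (fun x => x ++ [p.2])) PySem.Dict.empty with hdic
  have hkeys : dic.keys = PySem.Set.ofList (attrs.map (·.1)) := by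
    rw [hdic, PySem.Dict.keys_foldl_modify_key attrs (·.1) [] (fun _ p x => x ++ [p.2]),
      PySem.Dict.keys_empty, PySem.Set.update_nil_left]
  have hnd : dic.keys.Nodup := by
    rw [hdic]
    exact PySem.Dict.nodup_keys_foldl_modify_key attrs (·.1) [] (fun _ p x => x ++ [p.2])
      PySem.Dict.empty (by simp [PySem.Dict.keys_empty])
  have hgrp : ∀ k, dic.getD k [] = (attrs.filter (fun p => p.1 == k)).map (·.2) := by
    intro k
    rw [hdic, PySem.Dict.getD_foldl_modify_append attrs PySem.Dict.empty k]
    simp [PySem.Dict.getD_empty]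
  have hne : ∀ k, dic.contains k = true → dic.getD k [] ≠ [] := by
    intro k hk
    rw [PySem.Dict.contains_iff_mem_keys, hkeys, PySem.Set.mem_ofList] at hk
    obtain ⟨p, hp, hpk⟩ := List.mem_map.mp hk
    rw [hgrp k]
    simp only [ne_eq, List.map_eq_nil_iff, List.filter_eq_nil_iff, not_forall]
    exact ⟨p, hp, by simp [hpk]⟩
  have hkin : pvKeysIn (attrs.map (·.1)) dic = dic.keys := by
    rw [pv_keysIn_eq_filter, ← hkeys]
    exact List.filter_eq_self.mpr
      (fun k hk => (PySem.Dict.contains_iff_mem_keys dic k).mpr hk)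
  have hitems : dic.items = dic.keys.map (fun k => (k, dic.getD k [])) :=
    PySem.Dict.items_eq_map_keys dic hnd []
  rw [pv_loopA attrs dic [] hne hnd, List.nil_append, hkin, hitems, List.map_map]
  by_cases hk : dic.keys = []
  · simp [hk]
  · rw [if_neg (by simp [hk]), if_neg (by simp [hk])]
    congr 1

-- ===== VERDICT (by name: the statement is the Claim_ definition above) =====
theorem attrs_to_str_spec : Claim_equal_attrs_to_str := by
  intro attrs _
  unfold Spec_attrs_to_str
  exact attrs_to_str_eq attrs
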